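-- pv_equiv track=rewrite | github.com/carstenfahldieck/TOOL | test_darkblue_check.py | picker_clean_free_block
-- ===== SOURCE A (Python) =====
-- def picker_trim_common_indent(block_lines):
--     min_indent = None
--     index = 0
--
--     while index < len(block_lines):
--         line = block_lines[index][1]
--         if str(line).strip() != "":
--             indent = len(line) - len(line.lstrip(" "))
--             if min_indent is None or indent < min_indent:
--                 min_indent = indent
--         index += 1
--
--     if min_indent is None:
--         min_indent = 0
--
--     trimmed = []
--     index = 0
--
--     while index < len(block_lines):
--         src_idx, line = block_lines[index]
--
--         if line.strip() == "":
--             trimmed.append((src_idx, ""))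
--         else:
--             if len(line) >= min_indent:
--                 trimmed.append((src_idx, line[min_indent:]))
--             else:
--                 trimmed.append((src_idx, line))
--
--         index += 1
--
--     return trimmed
--
-- def picker_collapse_inner_blank_runs(block_lines):
--     result = []
--     last_was_blank = False
--
--     index = 0
--     while index < len(block_lines):
--         src_idx, line = block_lines[index]
--         is_blank = (str(line).strip() == "")
--
--         if is_blank:
--             if not last_was_blank:
--                 result.append((src_idx, ""))
--             last_was_blank = True
--         else:
--             result.append((src_idx, line))
--             last_was_blank = False
--
--         index += 1
--
--     return result
--
-- def picker_clean_free_block(block_lines):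
--     block_lines = picker_trim_common_indent(block_lines)
--     block_lines = picker_collapse_inner_blank_runs(block_lines)
--
--     while len(block_lines) > 0 and str(block_lines[0][1]).strip() == "":
--         del block_lines[0]
--
--     while len(block_lines) > 0 and str(block_lines[-1][1]).strip() == "":
--         del block_lines[-1]
--
--     return block_lines
-- ===== SOURCE B (Python) =====
-- def _min_indent(block_lines):
--     indents = [len(l) - len(l.lstrip(" ")) for _, l in block_lines if str(l).strip() != ""]
--     return min(indents) if indents else 0
--
-- def _clip(m, l):
--     return "" if str(l).strip() == "" else (l[m:] if len(l) >= m else l)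
--
-- def picker_clean_free_block(block_lines):
--     # One pass instead of trim pass + collapse pass + two edge-deletion loops:
--     # min indent first, then a single sweep with a pending-blank marker.
--     m = _min_indent(block_lines)
--     out = []
--     pending = None
--     for i, l in block_lines:
--         t = _clip(m, l)
--         if t.strip() == "":
--             if out and pending is None:
--                 pending = i
--         else:
--             if pending is not None:
--                 out.append((pending, ""))
--                 pending = None
--             out.append((i, t))
--     return out
-- ===== Notes on version B (the rewrite author's own statement) =====
-- stated objective: simpler
-- what changed: Replaces A's four passes (trim fold, collapse fold, delete-from-front loop, delete-from-back loop) by a min-indent scan plus ONE sweep with a pending-blank marker that trims, collapses blank runs and strips both edges at once.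
import Mathlib
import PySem

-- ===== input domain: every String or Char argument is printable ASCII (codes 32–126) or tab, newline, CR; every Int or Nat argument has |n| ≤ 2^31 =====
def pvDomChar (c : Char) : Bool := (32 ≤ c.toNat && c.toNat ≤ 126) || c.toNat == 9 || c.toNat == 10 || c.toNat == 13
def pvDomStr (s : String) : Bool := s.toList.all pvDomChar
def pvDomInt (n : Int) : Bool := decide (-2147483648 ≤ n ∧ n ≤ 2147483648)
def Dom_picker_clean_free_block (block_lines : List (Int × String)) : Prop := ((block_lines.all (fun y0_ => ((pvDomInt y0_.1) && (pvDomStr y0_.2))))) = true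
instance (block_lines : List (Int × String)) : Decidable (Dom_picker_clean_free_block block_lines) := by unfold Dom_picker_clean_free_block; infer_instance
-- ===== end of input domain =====

-- B does trim + blank-collapse + edge-strip in ONE sweep with a pending-blank marker,
-- instead of A's trim pass, collapse pass and two edge-deletion loops (return value only; neither mutates).

-- shared primitive-level helpers (both Pythons use the same expressions)
-- line is blank: str(line).strip() == ""  (line.strip() == "" is the same thing for strings)
def pvBlank (s : String) : Bool := PySem.Str.strip s == ""
-- len(line) - len(line.lstrip(" ")): lstrip(" ") drops exactly the leading ' ' characters (exact, hand-ported)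
def pvIndent (s : String) : Int :=
  (s.toList.length : Int) - ((s.toList.dropWhile (· == ' ')).length : Int)

-- ===== PORT A =====
def picker_trim_common_indent (block_lines : List (Int × String)) : List (Int × String) :=
  let minOpt : Option Int := block_lines.foldl (fun o p =>
    if pvBlank p.2 = false then
      match o with
      | none => some (pvIndent p.2)
      | some v => if pvIndent p.2 < v then some (pvIndent p.2) else some v
    else o) none
  let m : Int := minOpt.getD 0
  block_lines.foldl (fun acc p =>
    if pvBlank p.2 then acc ++ [(p.1, "")]
    else if m ≤ PySem.Str.len p.2 then acc ++ [(p.1, PySem.Str.slice p.2 (some m) none)]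
    else acc ++ [(p.1, p.2)]) []

def picker_collapse_inner_blank_runs (block_lines : List (Int × String)) : List (Int × String) :=
  (block_lines.foldl (fun (st : List (Int × String) × Bool) p =>
      if pvBlank p.2 then
        (if st.2 then st.1 else st.1 ++ [(p.1, "")], true)
      else (st.1 ++ [(p.1, p.2)], false)) ([], false)).1

-- while len > 0 and first line is blank: del block_lines[0]
def pvDropLead : List (Int × String) → List (Int × String)
  | [] => []
  | p :: r => if pvBlank p.2 then pvDropLead r else p :: r

-- while len > 0 and last line is blank: del block_lines[-1]
def pvDropTrail (l : List (Int × String)) : List (Int × String) :=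
  if _h : (match l.getLast? with | none => false | some e => pvBlank e.2) = true
  then pvDropTrail l.dropLast else l
termination_by l.length
decreasing_by
  cases l with
  | nil => simp at _h
  | cons a t => simp [List.length_dropLast]

def picker_clean_free_block (block_lines : List (Int × String)) : List (Int × String) :=
  pvDropTrail (pvDropLead (picker_collapse_inner_blank_runs (picker_trim_common_indent block_lines)))

-- ===== PORT B =====
-- min indent over the non-blank lines, default 0
def pvMinIndent (block_lines : List (Int × String)) : Int :=
  match block_lines.filterMap (fun p => if pvBlank p.2 then none else some (pvIndent p.2)) with
  | [] => 0
  | h :: t => t.foldl min h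

-- "" for a blank line, else the line with the common indent removed
def pvClip (m : Int) (l : String) : String :=
  if pvBlank l then ""
  else if m ≤ PySem.Str.len l then PySem.Str.slice l (some m) none else l

def picker_clean_free_block_alt (block_lines : List (Int × String)) : List (Int × String) :=
  let m : Int := pvMinIndent block_lines
  (block_lines.foldl (fun (st : List (Int × String) × Option Int) p =>
      if pvBlank (pvClip m p.2) then
        (st.1, if st.1 ≠ [] ∧ st.2 = none then some p.1 else st.2)
      else
        match st.2 with
        | some q => (st.1 ++ [(q, "")] ++ [(p.1, pvClip m p.2)], none)
        | none => (st.1 ++ [(p.1, pvClip m p.2)], none)) ([], none)).1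

-- ===== PRECONDITION & SPEC =====
def Spec_picker_clean_free_block (block_lines : List (Int × String)) (out : List (Int × String)) : Prop := out = picker_clean_free_block_alt block_lines
instance (block_lines : List (Int × String)) (out : List (Int × String)) : Decidable (Spec_picker_clean_free_block block_lines out) := by unfold Spec_picker_clean_free_block; infer_instance

-- ===== CLAIM (what is proved, stated in full; the proofs are below) =====
def Claim_equal_picker_clean_free_block : Prop := ∀ (block_lines : List (Int × String)), Dom_picker_clean_free_block block_lines → Spec_picker_clean_free_block block_lines (picker_clean_free_block block_lines)

-- ===== LEMMAS AND PROOFS =====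

-- proof-only helpers
def pvMapT (m : Int) (bl : List (Int × String)) : List (Int × String) :=
  bl.map (fun p => (p.1, pvClip m p.2))

-- recursive characterisation of the collapse fold
def pvC : Bool → List (Int × String) → List (Int × String)
  | _, [] => []
  | lb, e :: r =>
    if pvBlank e.2 then (if lb then pvC true r else (e.1, "") :: pvC true r)
    else e :: pvC false r

-- collapse-and-strip-trailing, given a pending blank index
def pvG : Option Int → List (Int × String) → List (Int × String)
  | _, [] => []
  | p, e :: r =>
    if pvBlank e.2 then pvG (match p with | none => some e.1 | some q => some q) r
    else (match p with | none => [] | some q => [(q, "")]) ++ e :: pvG none r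

-- lead-stripped collapse
def pvCl : List (Int × String) → List (Int × String)
  | [] => []
  | e :: r => if pvBlank e.2 then pvCl r else e :: pvC false r

-- B's whole sweep, recursively
def pvH : List (Int × String) → List (Int × String)
  | [] => []
  | e :: r => if pvBlank e.2 then pvH r else e :: pvG none r

-- B's fold step as a named function of the already-clipped entry
def pvBStep (st : List (Int × String) × Option Int) (e : Int × String) :
    List (Int × String) × Option Int :=
  if pvBlank e.2 then (st.1, if st.1 ≠ [] ∧ st.2 = none then some e.1 else st.2)
  else
    match st.2 with
    | some q => (st.1 ++ [(q, "")] ++ [e], none)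
    | none => (st.1 ++ [e], none)

lemma pvBlank_empty : pvBlank "" = true := by decide

-- A's min fold equals folding min over the indent list (some-state)
lemma pvMinA_some (bl : List (Int × String)) (v : Int) :
    bl.foldl (fun o p =>
      if pvBlank p.2 = false then
        match o with
        | none => some (pvIndent p.2)
        | some v => if pvIndent p.2 < v then some (pvIndent p.2) else some v
      else o) (some v)
    = some ((bl.filterMap (fun p => if pvBlank p.2 then none else some (pvIndent p.2))).foldl min v) := by
  induction bl generalizing v with
  | nil => rfl
  | cons p t ih =>
    by_cases hb : pvBlank p.2
    · simp only [List.foldl_cons, List.filterMap_cons, hb]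
      simpa using ih v
    · have hmin : (if pvIndent p.2 < v then some (pvIndent p.2) else some v)
          = some (min v (pvIndent p.2)) := by
        split_ifs with h
        · congr 1; omega
        · congr 1; omega
      rw [Bool.not_eq_true] at hb
      simp only [List.foldl_cons, List.filterMap_cons, hb, Bool.false_eq_true, if_false, hmin]
      simpa using ih (min v (pvIndent p.2))

-- A's min (with default 0) is pvMinIndent
lemma pvMinA_eq (bl : List (Int × String)) :
    (bl.foldl (fun o p =>
      if pvBlank p.2 = false then
        match o with
        | none => some (pvIndent p.2)
        | some v => if pvIndent p.2 < v then some (pvIndent p.2) else some v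
      else o) none).getD 0 = pvMinIndent bl := by
  induction bl with
  | nil => rfl
  | cons p t ih =>
    by_cases hb : pvBlank p.2
    · simpa [pvMinIndent, List.foldl_cons, List.filterMap_cons, hb] using ih
    · simp [pvMinIndent, List.foldl_cons, hb, pvMinA_some]

-- the trim fold is a map
lemma pvTrimFold (bl : List (Int × String)) (m : Int) :
    bl.foldl (fun acc p =>
      if pvBlank p.2 then acc ++ [(p.1, "")]
      else if m ≤ PySem.Str.len p.2 then acc ++ [(p.1, PySem.Str.slice p.2 (some m) none)]
      else acc ++ [(p.1, p.2)]) []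
    = pvMapT m bl := by
  have hstep : (fun (acc : List (Int × String)) (p : Int × String) =>
      if pvBlank p.2 then acc ++ [(p.1, "")]
      else if m ≤ PySem.Str.len p.2 then acc ++ [(p.1, PySem.Str.slice p.2 (some m) none)]
      else acc ++ [(p.1, p.2)])
      = fun acc p => acc ++ [(p.1, pvClip m p.2)] := by
    funext acc p
    simp only [pvClip]
    split_ifs <;> rfl
  rw [hstep, PySem.List.foldl_append_singleton_eq_map]
  rfl

lemma pvTrimA (bl : List (Int × String)) :
    picker_trim_common_indent bl = pvMapT (pvMinIndent bl) bl := by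
  simp only [picker_trim_common_indent]
  simp only [pvMinA_eq]
  exact pvTrimFold bl (pvMinIndent bl)

-- the collapse fold is pvC
lemma pvCollapseFold (ys : List (Int × String)) (acc : List (Int × String)) (lb : Bool) :
    (ys.foldl (fun (st : List (Int × String) × Bool) p =>
      if pvBlank p.2 then
        (if st.2 then st.1 else st.1 ++ [(p.1, "")], true)
      else (st.1 ++ [(p.1, p.2)], false)) (acc, lb)).1 = acc ++ pvC lb ys := by
  induction ys generalizing acc lb with
  | nil => simp [pvC]
  | cons e r ih =>
    by_cases hb : pvBlank e.2
    · cases lb <;> simp [List.foldl_cons, hb, pvC, ih]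
    · simp [List.foldl_cons, hb, pvC, ih]

lemma pvCollapse (ys : List (Int × String)) :
    picker_collapse_inner_blank_runs ys = pvC false ys := by
  unfold picker_collapse_inner_blank_runs
  simpa using pvCollapseFold ys [] false

-- stripping leading blanks off a collapsed list
lemma pvDropLead_pvC (ys : List (Int × String)) (lb : Bool) :
    pvDropLead (pvC lb ys) = pvCl ys := by
  induction ys generalizing lb with
  | nil => cases lb <;> rfl
  | cons e r ih =>
    by_cases hb : pvBlank e.2
    · cases lb
      · simp [pvC, hb, pvCl, pvDropLead, pvBlank_empty, ih]
      · simp [pvC, hb, pvCl, ih]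
    · simp [pvC, hb, pvCl, pvDropLead]

-- the trailing while-loop is reverse ∘ dropWhile blank ∘ reverse
lemma pvDropTrail_eq (l : List (Int × String)) :
    pvDropTrail l = (l.reverse.dropWhile (fun e => pvBlank e.2)).reverse := by
  induction hn : l.length using Nat.strong_induction_on generalizing l with
  | _ n ih =>
    rw [pvDropTrail]
    rcases eq_or_ne l [] with rfl | hne
    · simp
    · have hq : (match l.getLast? with | none => false | some e => pvBlank e.2)
          = pvBlank (l.getLast hne).2 := by
        rw [List.getLast?_eq_some_getLast hne]
      have hsplit : l.reverse = l.getLast hne :: l.dropLast.reverse := by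
        conv_lhs => rw [← List.dropLast_append_getLast hne]
        simp
      rw [hq]
      by_cases hbl : pvBlank (l.getLast hne).2 = true
      · have hlen : l.dropLast.length < n := by
          have := List.length_pos_of_ne_nil hne
          simp [List.length_dropLast]; omega
        rw [dif_pos hbl, ih _ hlen l.dropLast rfl, hsplit, List.dropWhile_cons_of_pos (by simpa using hbl)]
      · rw [Bool.not_eq_true] at hbl
        rw [dif_neg (by simp [hbl]), hsplit, List.dropWhile_cons_of_neg (by simp [hbl]), ← hsplit]
        simp

lemma pvDropTrail_nil : pvDropTrail [] = [] := by
  rw [pvDropTrail_eq]; rfl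

lemma pvDropTrail_cons (e : Int × String) (ys : List (Int × String)) :
    pvDropTrail (e :: ys)
      = if pvDropTrail ys = [] then (if pvBlank e.2 then [] else [e])
        else e :: pvDropTrail ys := by
  rw [pvDropTrail_eq, pvDropTrail_eq]
  rw [show (e :: ys).reverse = ys.reverse ++ [e] by simp]
  rw [List.dropWhile_append]
  by_cases hz : (ys.reverse.dropWhile (fun e => pvBlank e.2)).isEmpty = true
  · rw [List.isEmpty_iff] at hz
    rw [if_pos (by rw [hz]; rfl), if_pos (by rw [hz]; rfl)]
    cases hb : pvBlank e.2 <;> simp [List.dropWhile, hb]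
  · have hz' : (ys.reverse.dropWhile (fun e => pvBlank e.2)) ≠ [] := by
      simpa [List.isEmpty_iff] using hz
    rw [if_neg (by simpa [List.isEmpty_iff] using hz'), if_neg (by simpa using hz')]
    simp

-- the key correspondence: collapse with trailing blanks stripped is pvG
lemma pvK (ys : List (Int × String)) :
    pvDropTrail (pvC false ys) = pvG none ys
    ∧ ∀ q : Int, pvDropTrail ((q, "") :: pvC true ys) = pvG (some q) ys := by
  induction ys with
  | nil =>
    constructor
    · simp [pvC, pvG, pvDropTrail_nil]
    · intro q
      rw [show pvC true [] = [] from rfl, pvDropTrail_cons]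
      simp [pvDropTrail_nil, pvBlank_empty, pvG]
  | cons e r ih =>
    obtain ⟨ih1, ih2⟩ := ih
    cases hb : pvBlank e.2 with
    | true =>
      constructor
      · simp only [pvC, pvG, hb, if_true]
        exact ih2 e.1
      · intro q
        simp only [pvC, pvG, hb, if_true]
        exact ih2 q
    | false =>
      have hcons : pvDropTrail (e :: pvC false r) = e :: pvG none r := by
        rw [pvDropTrail_cons, ih1]
        by_cases hnil : pvG none r = [] <;> simp [hnil, hb]
      constructor
      · simp only [pvC, hb, Bool.false_eq_true, if_false]
        simpa [pvG, hb] using hcons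
      · intro q
        simp only [pvC, hb, Bool.false_eq_true, if_false]
        rw [pvDropTrail_cons, hcons]
        simp [pvG, hb]

lemma pvDropTrail_pvCl (ys : List (Int × String)) :
    pvDropTrail (pvCl ys) = pvH ys := by
  induction ys with
  | nil => simp [pvCl, pvH, pvDropTrail_nil]
  | cons e r ih =>
    cases hb : pvBlank e.2 with
    | true => simpa [pvCl, pvH, hb] using ih
    | false =>
      simp only [pvCl, pvH, hb, Bool.false_eq_true, if_false]
      rw [pvDropTrail_cons, (pvK r).1]
      by_cases hnil : pvG none r = [] <;> simp [hnil, hb]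

-- B's fold with a nonempty accumulator is pvG
lemma pvBFold_g (ys : List (Int × String)) (p : Option Int) (acc : List (Int × String))
    (hacc : acc ≠ []) :
    (ys.foldl pvBStep (acc, p)).1 = acc ++ pvG p ys := by
  induction ys generalizing p acc with
  | nil => simp [pvG]
  | cons e r ih =>
    by_cases hb : pvBlank e.2
    · have hstep : pvBStep (acc, p) e
          = (acc, match p with | none => some e.1 | some q => some q) := by
        cases p <;> simp [pvBStep, hb, hacc]
      rw [List.foldl_cons, hstep, ih _ _ hacc]
      simp [pvG, hb]
    · cases p with
      | none =>
        rw [List.foldl_cons, show pvBStep (acc, none) e = (acc ++ [e], none) by simp [pvBStep, hb],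
          ih _ _ (by simp)]
        simp [pvG, hb]
      | some q =>
        rw [List.foldl_cons,
          show pvBStep (acc, some q) e = (acc ++ [(q, "")] ++ [e], none) by simp [pvBStep, hb],
          ih _ _ (by simp)]
        simp [pvG, hb]

lemma pvBFold_empty (ys : List (Int × String)) :
    (ys.foldl pvBStep ([], none)).1 = pvH ys := by
  induction ys with
  | nil => rfl
  | cons e r ih =>
    by_cases hb : pvBlank e.2
    · rw [List.foldl_cons,
        show pvBStep (([] : List (Int × String)), none) e = ([], none) by simp [pvBStep, hb], ih]
      simp [pvH, hb]
    · rw [List.foldl_cons,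
        show pvBStep (([] : List (Int × String)), none) e = ([e], none) by simp [pvBStep, hb],
        pvBFold_g r none [e] (by simp)]
      simp [pvH, hb]

lemma pvB_eq (bl : List (Int × String)) :
    picker_clean_free_block_alt bl = pvH (pvMapT (pvMinIndent bl) bl) := by
  simp only [picker_clean_free_block_alt]
  have hstep : (fun (st : List (Int × String) × Option Int) (p : Int × String) =>
      if pvBlank (pvClip (pvMinIndent bl) p.2) then
        (st.1, if st.1 ≠ [] ∧ st.2 = none then some p.1 else st.2)
      else
        match st.2 with
        | some q => (st.1 ++ [(q, "")] ++ [(p.1, pvClip (pvMinIndent bl) p.2)], none)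
        | none => (st.1 ++ [(p.1, pvClip (pvMinIndent bl) p.2)], none))
      = fun st p => pvBStep st ((fun q : Int × String => (q.1, pvClip (pvMinIndent bl) q.2)) p) := by
    funext st p
    rfl
  rw [hstep, ← List.foldl_map, pvBFold_empty]
  rfl

lemma pvA_eq (bl : List (Int × String)) :
    picker_clean_free_block bl = pvH (pvMapT (pvMinIndent bl) bl) := by
  unfold picker_clean_free_block
  rw [pvTrimA, pvCollapse, pvDropLead_pvC, pvDropTrail_pvCl]

-- ===== VERDICT (by name: the statement is the Claim_ definition above) =====
theorem picker_clean_free_block_spec : Claim_equal_picker_clean_free_block := by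
  intro bl _
  unfold Spec_picker_clean_free_block
  rw [pvA_eq, pvB_eq]
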